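-- pv_equiv track=rewrite | github.com/yiheng98/ProfMal | dynamic_helper.py | extract_call2source
-- ===== SOURCE A (Python) =====
-- def extract_call2source(json_data):
--     pairs = []
--
--     for i, item in enumerate(json_data):
--         if item.startswith("Source:"):
--             # Look backwards for the first "Call:" item
--             for j in range(i - 1, -1, -1):
--                 if json_data[j].startswith("Call:"):
--                     new_str = json_data[j].replace("(", "").replace(")", "")
--                     pairs.append({"call": new_str, "source": item})
--                     break
--
--     return pairs
-- ===== SOURCE B (Python) =====
-- def extract_call2source(json_data):
--     # Single forward pass: remember the most recent "Call:" item seen so far.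
--     pairs = []
--     last_call = None
--     for item in json_data:
--         if item.startswith("Call:"):
--             last_call = item
--         elif item.startswith("Source:") and last_call is not None:
--             pairs.append({"call": last_call.replace("(", "").replace(")", ""),
--                           "source": item})
--     return pairs
-- ===== Notes on version B (the rewrite author's own statement) =====
-- stated objective: simpler
-- what changed: Replaced the per-Source backward scan for the nearest preceding Call with a single forward pass that tracks the last seen Call item.
import Mathlib
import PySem

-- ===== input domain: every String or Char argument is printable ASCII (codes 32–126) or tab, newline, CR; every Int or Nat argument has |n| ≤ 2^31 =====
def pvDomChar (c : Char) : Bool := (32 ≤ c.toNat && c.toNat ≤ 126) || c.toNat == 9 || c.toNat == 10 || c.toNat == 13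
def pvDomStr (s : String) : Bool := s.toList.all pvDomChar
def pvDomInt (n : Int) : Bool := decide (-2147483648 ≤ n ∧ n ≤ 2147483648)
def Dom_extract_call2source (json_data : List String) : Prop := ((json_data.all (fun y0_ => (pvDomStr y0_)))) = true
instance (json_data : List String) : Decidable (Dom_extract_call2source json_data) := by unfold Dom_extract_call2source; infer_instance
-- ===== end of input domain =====

-- B replaces A's per-"Source:" backward scan by one forward pass tracking the last "Call:" item (simpler).

-- ===== PORT A =====
-- inner loop 'for j in range(i-1, -1, -1): if json_data[j].startswith("Call:"): …append…; break'
-- (pyGet? is none only on an out-of-range index, which range(i-1,-1,-1) never produces here)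
def pvInnerA (json_data : List String) (item : String)
    (pairs : List (List (String × String))) : List Int → List (List (String × String))
  | [] => pairs
  | j :: rest =>
    match PySem.List.pyGet? json_data j with
    | none => pairs
    | some s =>
      if PySem.Str.startswith s "Call:" then
        pairs ++ [[("call", PySem.Str.replace (PySem.Str.replace s "(" "") ")" ""), ("source", item)]]
      else pvInnerA json_data item pairs rest

-- outer loop 'for i, item in enumerate(json_data)' with index counter i
def pvLoopA (json_data : List String) (i : Int) :
    List String → List (List (String × String)) → List (List (String × String))
  | [], pairs => pairs
  | item :: rest, pairs =>
    pvLoopA json_data (i + 1) rest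
      (if PySem.Str.startswith item "Source:" then
        pvInnerA json_data item pairs (PySem.List.pyRange (i - 1) (-1) (-1))
      else pairs)

def extract_call2source (json_data : List String) : List (List (String × String)) :=
  pvLoopA json_data 0 json_data []

-- ===== PORT B =====
-- state = (pairs, last_call)
def pvStepB (st : List (List (String × String)) × Option String) (item : String) :
    List (List (String × String)) × Option String :=
  if PySem.Str.startswith item "Call:" then (st.1, some item)
  else if PySem.Str.startswith item "Source:" then
    match st.2 with
    | some c => (st.1 ++ [[("call", PySem.Str.replace (PySem.Str.replace c "(" "") ")" ""), ("source", item)]], st.2)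
    | none => st
  else st

def extract_call2source_alt (json_data : List String) : List (List (String × String)) :=
  (json_data.foldl pvStepB ([], none)).1

-- ===== PRECONDITION & SPEC =====
def Spec_extract_call2source (json_data : List String) (out : List (List (String × String))) : Prop := out = extract_call2source_alt json_data
instance (json_data : List String) (out : List (List (String × String))) : Decidable (Spec_extract_call2source json_data out) := by unfold Spec_extract_call2source; infer_instance

-- ===== CLAIM (what is proved, stated in full; the proofs are below) =====
def Claim_equal_extract_call2source : Prop := ∀ (json_data : List String), Dom_extract_call2source json_data → Spec_extract_call2source json_data (extract_call2source json_data)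

-- ===== LEMMAS AND PROOFS =====

-- the last element of xs starting with "Call:", if any (= B's last_call after scanning xs)
def pvLastCall (xs : List String) : Option String :=
  xs.foldl (fun acc x => if PySem.Str.startswith x "Call:" then some x else acc) none

theorem pvLastCall_append_singleton (xs : List String) (x : String) :
    pvLastCall (xs ++ [x]) =
      if PySem.Str.startswith x "Call:" then some x else pvLastCall xs := by
  simp [pvLastCall, List.foldl_append]

theorem pv_call_eq (x : String) :
    PySem.Str.startswith x "Call:" = PySem.Chars.startswith x.toList ['C','a','l','l',':'] := by
  simp

theorem pv_source_eq (x : String) :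
    PySem.Str.startswith x "Source:" = PySem.Chars.startswith x.toList ['S','o','u','r','c','e',':'] := by
  simp

-- a string cannot start with both "Source:" and "Call:"
theorem pv_not_both (x : String)
    (hs : PySem.Chars.startswith x.toList ['S','o','u','r','c','e',':'] = true) :
    PySem.Chars.startswith x.toList ['C','a','l','l',':'] = false := by
  by_contra h
  rw [Bool.not_eq_false] at h
  rw [PySem.Chars.startswith_iff] at hs h
  obtain ⟨t1, h1⟩ := hs
  obtain ⟨t2, h2⟩ := h
  rw [← h2] at h1
  simp at h1

theorem pvInnerA_eq (pre : List String) : ∀ (suf : List String) (item : String)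
    (pairs : List (List (String × String))),
    pvInnerA (pre ++ suf) item pairs (PySem.List.pyRange ((pre.length : Int) - 1) (-1) (-1)) =
      match pvLastCall pre with
      | none => pairs
      | some c => pairs ++ [[("call", PySem.Str.replace (PySem.Str.replace c "(" "") ")" ""), ("source", item)]] := by
  induction pre using List.reverseRecOn with
  | nil =>
    intro suf item pairs
    rw [show ((([] : List String).length : Int) - 1) = -1 by simp,
        PySem.List.pyRange_neg_one_eq_nil (le_refl _)]
    simp [pvInnerA, pvLastCall]
  | append_singleton p x ih =>
    intro suf item pairs
    have hlen : (((p ++ [x]).length : Int) - 1) = (p.length : Int) := by simp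
    rw [hlen, PySem.List.pyRange_neg_one_cons (by omega)]
    have hget : PySem.List.pyGet? ((p ++ [x]) ++ suf) ((p.length : Int)) = some x := by
      rw [PySem.List.pyGet?_natCast]
      simp
    rw [pvInnerA, hget]
    simp only
    rw [pvLastCall_append_singleton]
    by_cases hc : PySem.Str.startswith x "Call:" = true
    · rw [pv_call_eq] at hc
      simp [hc]
    · simp only [Bool.not_eq_true] at hc
      rw [hc]
      simp only [Bool.false_eq_true, if_false]
      have := ih ([x] ++ suf) item pairs
      rw [← List.append_assoc] at this
      exact this

theorem pvLoopA_eq (suf : List String) : ∀ (pre : List String)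
    (pairs : List (List (String × String))),
    pvLoopA (pre ++ suf) (pre.length : Int) suf pairs =
      (suf.foldl pvStepB (pairs, pvLastCall pre)).1 := by
  induction suf with
  | nil => intro pre pairs; simp [pvLoopA]
  | cons x rest ih =>
    intro pre pairs
    rw [pvLoopA, List.foldl_cons]
    have hassoc : pre ++ x :: rest = (pre ++ [x]) ++ rest := by simp
    have hlen : (pre.length : Int) + 1 = (((pre ++ [x]).length : Nat) : Int) := by simp
    rw [hassoc, hlen]
    rw [ih (pre ++ [x])]
    congr 1
    rw [pvLastCall_append_singleton]
    by_cases hc : PySem.Str.startswith x "Call:" = true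
    · have hs' : PySem.Str.startswith x "Source:" = false := by
        rw [pv_call_eq] at hc
        rw [pv_source_eq]
        by_contra h
        rw [Bool.not_eq_false] at h
        rw [pv_not_both x h] at hc
        exact Bool.false_ne_true hc
      rw [if_neg (by rw [hs']; exact Bool.false_ne_true)]
      rw [pv_call_eq] at hc
      simp [pvStepB, hc]
    · simp only [Bool.not_eq_true] at hc
      by_cases hs' : PySem.Str.startswith x "Source:" = true
      · rw [if_pos hs']
        have := pvInnerA_eq pre (x :: rest) x pairs
        rw [hassoc] at this
        rw [this]
        rw [pv_call_eq] at hc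
        rw [pv_source_eq] at hs'
        cases h : pvLastCall pre with
        | none => simp [pvStepB, hc, hs']
        | some c => simp [pvStepB, hc, hs']
      · simp only [Bool.not_eq_true] at hs'
        rw [if_neg (by rw [hs']; exact Bool.false_ne_true)]
        rw [pv_call_eq] at hc
        rw [pv_source_eq] at hs'
        simp [pvStepB, hc, hs']

-- ===== VERDICT (by name: the statement is the Claim_ definition above) =====
theorem extract_call2source_spec : Claim_equal_extract_call2source := by
  intro json_data _
  unfold Spec_extract_call2source extract_call2source extract_call2source_alt
  have := pvLoopA_eq json_data [] []
  simpa [pvLastCall] using this
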